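-- pv_equiv track=rewrite | github.com/nbalance97/BOJ | 구현/[ 15685 ] 드래곤 커브.py | get_movement
-- ===== SOURCE A (Python) =====
-- def convert(way):
--     return (way + 1) % 4
--
-- def get_movement(d, g):
--     mv = [d]
--     for _ in range(g):
--         new_mv = []
--         for i in range(len(mv)-1, -1, -1):
--             new_mv.append(convert(mv[i]))
--         mv += new_mv
--
--     return mv
-- ===== SOURCE B (Python) =====
-- def convert(way):
--     return (way + 1) % 4
--
-- def get_movement(d, g):
--     # recursive over generations: curve(g) = curve(g-1) followed by
--     # the reversed previous curve with each direction rotated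
--     if g <= 0:
--         return [d]
--     prev = get_movement(d, g - 1)
--     return prev + [convert(x) for x in reversed(prev)]
-- ===== Notes on version B (the rewrite author's own statement) =====
-- stated objective: alternative
-- what changed: Replaces the explicit doubling loop with index-wise reversed scans by direct recursion on the generation count, appending the rotated reversed previous curve via reversed()/map instead of indexing mv[i] in an inner countdown loop.
import Mathlib
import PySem

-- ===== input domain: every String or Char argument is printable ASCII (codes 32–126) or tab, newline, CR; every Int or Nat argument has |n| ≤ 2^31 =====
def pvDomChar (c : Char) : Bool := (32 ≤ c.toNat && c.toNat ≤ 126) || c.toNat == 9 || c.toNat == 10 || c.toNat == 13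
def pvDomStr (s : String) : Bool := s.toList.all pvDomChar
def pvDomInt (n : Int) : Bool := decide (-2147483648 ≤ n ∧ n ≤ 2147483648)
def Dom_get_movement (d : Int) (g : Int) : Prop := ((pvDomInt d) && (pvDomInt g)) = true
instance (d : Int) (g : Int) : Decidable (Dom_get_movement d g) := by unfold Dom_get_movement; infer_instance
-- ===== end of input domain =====

-- B replaces A's doubling loop with indexed countdown by direct recursion on the
-- generation count (alternative decomposition, same asymptotic cost).

-- ===== PORT A =====
def pvConvert (way : Int) : Int := PySem.Int.mod (way + 1) 4

def get_movement (d : Int) (g : Int) : List Int :=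
  (PySem.List.pyRange 0 g 1).foldl (fun mv _ =>
    -- new_mv built by the inner countdown loop; mv[i] is always in range here,
    -- so pyGetD with a default is exact
    let new_mv := (PySem.List.pyRange ((mv.length : Int) - 1) (-1) (-1)).foldl
      (fun acc i => acc ++ [pvConvert (PySem.List.pyGetD mv i 0)]) []
    mv ++ new_mv) [d]

-- ===== PORT B =====
def get_movement_alt (d : Int) (g : Int) : List Int :=
  if _h : g ≤ 0 then [d]
  else
    let prev := get_movement_alt d (g - 1)
    prev ++ prev.reverse.map pvConvert
termination_by g.toNat
decreasing_by omega

-- ===== PRECONDITION & SPEC =====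
def Spec_get_movement (d : Int) (g : Int) (out : List Int) : Prop := out = get_movement_alt d g
instance (d : Int) (g : Int) (out : List Int) : Decidable (Spec_get_movement d g out) := by unfold Spec_get_movement; infer_instance

-- ===== CLAIM (what is proved, stated in full; the proofs are below) =====
def Claim_equal_get_movement : Prop := ∀ (d : Int) (g : Int), Dom_get_movement d g → Spec_get_movement d g (get_movement d g)

-- ===== LEMMAS AND PROOFS =====

-- the inner countdown loop of A builds exactly the rotated reverse of mv
theorem pv_inner_eq (mv : List Int) :
    (PySem.List.pyRange ((mv.length : Int) - 1) (-1) (-1)).foldl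
      (fun acc i => acc ++ [pvConvert (PySem.List.pyGetD mv i 0)]) []
    = mv.reverse.map pvConvert := by
  rw [PySem.List.pyRange_neg_one_eq_reverse, PySem.List.foldl_append_singleton_eq_map]
  have h : ((-1 : Int) + 1) = 0 := by norm_num
  have h2 : ((mv.length : Int) - 1) + 1 = (mv.length : Int) := by ring
  rw [h, h2, List.nil_append,
    show (fun i => pvConvert (PySem.List.pyGetD mv i 0))
        = pvConvert ∘ (fun i => PySem.List.pyGetD mv i 0) from rfl,
    ← List.map_map, List.map_reverse, PySem.List.map_pyGetD_pyRange_zero']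

theorem pv_key (d : Int) : ∀ (n : Nat), get_movement d (n : Int) = get_movement_alt d (n : Int) := by
  intro n
  induction n with
  | zero =>
      simp [get_movement, get_movement_alt, PySem.List.pyRange_one_eq_nil]
  | succ n ih =>
      have hsplit : PySem.List.pyRange 0 ((n : Int) + 1) 1
          = PySem.List.pyRange 0 (n : Int) 1 ++ [(n : Int)] := by
        exact PySem.List.pyRange_one_succ_right (by exact_mod_cast Nat.zero_le n)
      have hA : get_movement d ((n : Nat) + 1 : Int)
          = (get_movement d (n : Int)) ++ ((get_movement d (n : Int)).reverse.map pvConvert) := by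
        unfold get_movement
        push_cast
        rw [hsplit, List.foldl_append]
        simp only [List.foldl_cons, List.foldl_nil]
        rw [pv_inner_eq]
      have hB : get_movement_alt d ((n : Nat) + 1 : Int)
          = (get_movement_alt d (n : Int)) ++ ((get_movement_alt d (n : Int)).reverse.map pvConvert) := by
        rw [get_movement_alt]
        have hne : ¬ ((n : Int) + 1 ≤ 0) := by omega
        simp only [hne, dite_false]
        norm_num
      push_cast at hA hB ⊢
      rw [hA, hB, ih]

-- ===== VERDICT (by name: the statement is the Claim_ definition above) =====
theorem get_movement_spec : Claim_equal_get_movement := by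
  unfold Claim_equal_get_movement Spec_get_movement
  intro d g _
  by_cases hg : g ≤ 0
  · rw [get_movement_alt]
    simp only [hg, dite_true]
    simp [get_movement, PySem.List.pyRange_one_eq_nil (by omega : g ≤ 0)]
  · have : g = (g.toNat : Int) := by omega
    rw [this]
    exact pv_key d g.toNat
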